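-- pv_equiv track=rewrite | github.com/LuisZunigaR/TheRabbitGame | sort.py | AlphanumericStringSort
-- ===== SOURCE A (Python) =====
-- def AlphanumericStringSort(sentence):
--     sorted_sentence = []
--     tmplower = []
--     tmpupper = []
--     tmpnumber = []
--     tmppair = []
--     tmpodd = []
--     for character in sentence:
--         if character.isupper():
--             tmpupper.append(character)
--         elif character.islower():
--             tmplower.append(character)
--         elif character.isdigit():
--             if int(character) % 2 == 0:
--                tmppair.append(character)
--             else:
--                 tmpodd.append(character)
--         else:
--             raise Exception("It's a not valid character")
--     tmpnumber = tmppair + tmpodd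
--     sorted_sentence =  tmplower + tmpupper + tmpnumber
--     return "".join(sorted_sentence)
-- ===== SOURCE B (Python) =====
-- def AlphanumericStringSort(sentence):
--     def rank(ch):
--         if ch.islower():
--             return 0
--         if ch.isupper():
--             return 1
--         if ch.isdigit():
--             return 2 if int(ch) % 2 == 0 else 3
--         raise Exception("It's a not valid character")
--     return "".join(sorted(sentence, key=rank))
-- ===== Notes on version B (the rewrite author's own statement) =====
-- stated objective: idiomatic
-- what changed: Replaces the five explicit bucket lists and their concatenation with a single stable sorted() call keyed by a rank function (lower 0, upper 1, even digit 2, odd digit 3); stability preserves intra-bucket order so the result is identical. Pre_ excludes only strings containing an ASCII character that is neither a letter nor a digit; on every such excluded input both A and B raise the same Exception.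
import Mathlib
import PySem

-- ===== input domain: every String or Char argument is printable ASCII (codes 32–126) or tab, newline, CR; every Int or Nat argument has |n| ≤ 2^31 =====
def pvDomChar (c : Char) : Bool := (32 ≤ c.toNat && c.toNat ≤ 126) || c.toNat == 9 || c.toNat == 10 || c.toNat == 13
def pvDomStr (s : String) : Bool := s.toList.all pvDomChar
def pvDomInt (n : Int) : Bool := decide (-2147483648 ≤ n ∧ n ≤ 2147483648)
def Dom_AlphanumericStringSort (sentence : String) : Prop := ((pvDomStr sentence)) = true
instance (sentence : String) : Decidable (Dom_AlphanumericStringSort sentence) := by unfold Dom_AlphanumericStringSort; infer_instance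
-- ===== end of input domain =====

-- B replaces A's five explicit bucket lists with one stable sort by a rank key (idiomatic rewrite, same values).


-- ===== PORT A =====
-- character tests of Python's str.isupper/islower/isdigit, exact on the ASCII domain
def pvIsUpperCh (c : Char) : Bool := 65 ≤ c.toNat && c.toNat ≤ 90
def pvIsLowerCh (c : Char) : Bool := 97 ≤ c.toNat && c.toNat ≤ 122
def pvIsDigitCh (c : Char) : Bool := 48 ≤ c.toNat && c.toNat ≤ 57

-- A's loop over the sentence, carrying the four bucket lists; `none` is exactly where
-- Python raises an Exception — excluded by Pre_.
def pvALoop : List Char → List Char → List Char → List Char → List Char →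
    Option (List Char × List Char × List Char × List Char)
  | [], l, u, p, o => some (l, u, p, o)
  | c :: cs, l, u, p, o =>
    if pvIsUpperCh c then pvALoop cs l (u ++ [c]) p o
    else if pvIsLowerCh c then pvALoop cs (l ++ [c]) u p o
    else if pvIsDigitCh c then
      if (c.toNat - 48) % 2 == 0 then pvALoop cs l u (p ++ [c]) o
      else pvALoop cs l u p (o ++ [c])
    else none

def AlphanumericStringSort (sentence : String) : String :=
  match pvALoop sentence.toList [] [] [] [] with
  | some (l, u, p, o) => String.ofList (l ++ u ++ (p ++ o))   -- "".join(tmplower + tmpupper + tmpnumber)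
  | none => ""   -- Python raises here; excluded by Pre_

-- ===== PORT B =====
-- Source B's key: lowercase 0, uppercase 1, even digit 2, odd digit 3; 4 marks the chars on
-- which the Python key raises — excluded by Pre_.
def pvRankCh (c : Char) : Nat :=
  if pvIsLowerCh c then 0
  else if pvIsUpperCh c then 1
  else if pvIsDigitCh c then (if (c.toNat - 48) % 2 == 0 then 2 else 3)
  else 4

def AlphanumericStringSort_alt (sentence : String) : String :=
  String.ofList (PySem.List.sorted sentence.toList pvRankCh false)   -- "".join(sorted(sentence, key=rank))

-- ===== PRECONDITION & SPEC =====
-- The claim covers only the printable-ASCII domain Dom_; within it, Pre_ holds exactly on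
-- strings of ASCII letters and digits, and on every excluded string (one containing some
-- other ASCII character) both A and B raise Exception("It's a not valid character").
def Pre_AlphanumericStringSort (sentence : String) : Prop :=
  (sentence.toList.all (fun c =>
    (decide (65 ≤ c.toNat) && decide (c.toNat ≤ 90)) || (decide (97 ≤ c.toNat) && decide (c.toNat ≤ 122))
      || (decide (48 ≤ c.toNat) && decide (c.toNat ≤ 57)))) = true
instance (sentence : String) : Decidable (Pre_AlphanumericStringSort sentence) := by
  unfold Pre_AlphanumericStringSort; infer_instance

def pvWitness_AlphanumericStringSort : String := "bA1c0"

def Spec_AlphanumericStringSort (sentence : String) (out : String) : Prop := out = AlphanumericStringSort_alt sentence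
instance (sentence : String) (out : String) : Decidable (Spec_AlphanumericStringSort sentence out) := by unfold Spec_AlphanumericStringSort; infer_instance

-- ===== CLAIM (what is proved, stated in full; the proofs are below) =====
def Claim_equal_AlphanumericStringSort : Prop := ∀ (sentence : String), Dom_AlphanumericStringSort sentence → Pre_AlphanumericStringSort sentence → Spec_AlphanumericStringSort sentence (AlphanumericStringSort sentence)

-- ===== LEMMAS AND PROOFS =====

lemma pvRank_le_three {c : Char}
    (h : (65 ≤ c.toNat ∧ c.toNat ≤ 90) ∨ (97 ≤ c.toNat ∧ c.toNat ≤ 122) ∨ (48 ≤ c.toNat ∧ c.toNat ≤ 57)) :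
    pvRankCh c ≤ 3 := by
  unfold pvRankCh pvIsLowerCh pvIsUpperCh pvIsDigitCh
  rcases h with ⟨h1, h2⟩ | ⟨h1, h2⟩ | ⟨h1, h2⟩ <;> split_ifs <;> simp_all

lemma pvInsertBy_prefix {α : Type} (before : α → α → Bool) (x : α) :
    ∀ (pre suf : List α), (∀ y ∈ pre, before x y = false) →
      PySem.List.insertBy before x (pre ++ suf) = pre ++ PySem.List.insertBy before x suf := by
  intro pre
  induction pre with
  | nil => simp
  | cons a pre ih =>
    intro suf h
    have ha : before x a = false := h a (by simp)
    simp [PySem.List.insertBy, ha, ih suf (fun y hy => h y (by simp [hy]))]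

lemma pvInsertBy_all_before {α : Type} (before : α → α → Bool) (x : α) :
    ∀ (ys : List α), (∀ y ∈ ys, before x y = true) →
      PySem.List.insertBy before x ys = x :: ys := by
  intro ys h
  cases ys with
  | nil => simp [PySem.List.insertBy]
  | cons a ys => simp [PySem.List.insertBy, h a (by simp)]

-- the stable insertion-sort step keeps the four rank buckets concatenated in rank order
lemma pvFoldl_ins_buckets :
    ∀ (xs a0 a1 a2 a3 : List Char),
      (∀ c ∈ a0, pvRankCh c = 0) → (∀ c ∈ a1, pvRankCh c = 1) →
      (∀ c ∈ a2, pvRankCh c = 2) → (∀ c ∈ a3, pvRankCh c = 3) →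
      (∀ c ∈ xs, pvRankCh c ≤ 3) →
      List.foldl (fun acc x => PySem.List.insertBy (fun a b => decide (pvRankCh a < pvRankCh b)) x acc)
        (a0 ++ a1 ++ a2 ++ a3) xs
      = (a0 ++ xs.filter (fun c => pvRankCh c == 0)) ++ (a1 ++ xs.filter (fun c => pvRankCh c == 1))
        ++ (a2 ++ xs.filter (fun c => pvRankCh c == 2)) ++ (a3 ++ xs.filter (fun c => pvRankCh c == 3)) := by
  intro xs
  induction xs with
  | nil => intro a0 a1 a2 a3 _ _ _ _ _; simp
  | cons x xs ih =>
    intro a0 a1 a2 a3 h0 h1 h2 h3 hxs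
    have hx : pvRankCh x ≤ 3 := hxs x (by simp)
    have hrest : ∀ c ∈ xs, pvRankCh c ≤ 3 := fun c hc => hxs c (by simp [hc])
    simp only [List.foldl_cons]
    interval_cases hr : (pvRankCh x)
    · -- rank 0: x goes right after a0
      have step : PySem.List.insertBy (fun a b => decide (pvRankCh a < pvRankCh b)) x
          (a0 ++ a1 ++ a2 ++ a3) = (a0 ++ [x]) ++ a1 ++ a2 ++ a3 := by
        simp only [List.append_assoc]
        rw [pvInsertBy_prefix _ x a0 (a1 ++ (a2 ++ a3))
            (fun y hy => by simp [h0 y hy, hr]),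
          pvInsertBy_all_before _ x (a1 ++ (a2 ++ a3))
            (fun y hy => by
              rcases (by simpa using hy : y ∈ a1 ∨ y ∈ a2 ∨ y ∈ a3) with hy | hy | hy
              · simp [h1 y hy, hr]
              · simp [h2 y hy, hr]
              · simp [h3 y hy, hr])]
        simp
      rw [step, ih (a0 ++ [x]) a1 a2 a3
        (fun c hc => by
          rcases (by simpa using hc : c ∈ a0 ∨ c = x) with hc | rfl
          · exact h0 c hc
          · exact hr)
        h1 h2 h3 hrest]
      simp [hr, List.append_assoc]
    · -- rank 1
      have step : PySem.List.insertBy (fun a b => decide (pvRankCh a < pvRankCh b)) x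
          (a0 ++ a1 ++ a2 ++ a3) = a0 ++ (a1 ++ [x]) ++ a2 ++ a3 := by
        simp only [List.append_assoc]
        rw [pvInsertBy_prefix _ x a0 (a1 ++ (a2 ++ a3))
            (fun y hy => by simp [h0 y hy, hr]),
          pvInsertBy_prefix _ x a1 (a2 ++ a3)
            (fun y hy => by simp [h1 y hy, hr]),
          pvInsertBy_all_before _ x (a2 ++ a3)
            (fun y hy => by
              rcases (by simpa using hy : y ∈ a2 ∨ y ∈ a3) with hy | hy
              · simp [h2 y hy, hr]
              · simp [h3 y hy, hr])]
        simp
      rw [step, ih a0 (a1 ++ [x]) a2 a3 h0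
        (fun c hc => by
          rcases (by simpa using hc : c ∈ a1 ∨ c = x) with hc | rfl
          · exact h1 c hc
          · exact hr)
        h2 h3 hrest]
      simp [hr, List.append_assoc]
    · -- rank 2
      have step : PySem.List.insertBy (fun a b => decide (pvRankCh a < pvRankCh b)) x
          (a0 ++ a1 ++ a2 ++ a3) = a0 ++ a1 ++ (a2 ++ [x]) ++ a3 := by
        simp only [List.append_assoc]
        rw [pvInsertBy_prefix _ x a0 (a1 ++ (a2 ++ a3))
            (fun y hy => by simp [h0 y hy, hr]),
          pvInsertBy_prefix _ x a1 (a2 ++ a3)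
            (fun y hy => by simp [h1 y hy, hr]),
          pvInsertBy_prefix _ x a2 a3
            (fun y hy => by simp [h2 y hy, hr]),
          pvInsertBy_all_before _ x a3 (fun y hy => by simp [h3 y hy, hr])]
        simp
      rw [step, ih a0 a1 (a2 ++ [x]) a3 h0 h1
        (fun c hc => by
          rcases (by simpa using hc : c ∈ a2 ∨ c = x) with hc | rfl
          · exact h2 c hc
          · exact hr)
        h3 hrest]
      simp [hr, List.append_assoc]
    · -- rank 3: x goes to the very end
      have step : PySem.List.insertBy (fun a b => decide (pvRankCh a < pvRankCh b)) x
          (a0 ++ a1 ++ a2 ++ a3) = a0 ++ a1 ++ a2 ++ (a3 ++ [x]) := by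
        rw [PySem.List.insertBy_of_forall_not_before _ x _
          (fun y hy => by
            rcases (by simpa using hy : y ∈ a0 ∨ y ∈ a1 ∨ y ∈ a2 ∨ y ∈ a3) with hy | hy | hy | hy
            · simp [h0 y hy, hr]
            · simp [h1 y hy, hr]
            · simp [h2 y hy, hr]
            · simp [h3 y hy, hr])]
        simp
      rw [step, ih a0 a1 a2 (a3 ++ [x]) h0 h1 h2
        (fun c hc => by
          rcases (by simpa using hc : c ∈ a3 ∨ c = x) with hc | rfl
          · exact h3 c hc
          · exact hr)
        hrest]
      simp [hr, List.append_assoc]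

lemma pvSorted_buckets (xs : List Char) (h : ∀ c ∈ xs, pvRankCh c ≤ 3) :
    PySem.List.sorted xs pvRankCh false
      = xs.filter (fun c => pvRankCh c == 0) ++ xs.filter (fun c => pvRankCh c == 1)
        ++ xs.filter (fun c => pvRankCh c == 2) ++ xs.filter (fun c => pvRankCh c == 3) := by
  rw [PySem.List.sorted_eq_foldl_insertBy]
  simpa using pvFoldl_ins_buckets xs [] [] [] [] (by simp) (by simp) (by simp) (by simp) h

-- the branch tests of A's loop, expressed through B's rank
lemma pvRank_eq_one {c : Char} (h : pvIsUpperCh c = true) : pvRankCh c = 1 := by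
  have hl : pvIsLowerCh c = false := by
    unfold pvIsLowerCh; unfold pvIsUpperCh at h; simp_all; omega
  unfold pvRankCh; simp [hl, h]

lemma pvALoop_spec :
    ∀ (cs l u p o : List Char), (∀ c ∈ cs, pvRankCh c ≤ 3) →
      pvALoop cs l u p o
        = some (l ++ cs.filter (fun c => pvRankCh c == 0), u ++ cs.filter (fun c => pvRankCh c == 1),
                p ++ cs.filter (fun c => pvRankCh c == 2), o ++ cs.filter (fun c => pvRankCh c == 3)) := by
  intro cs
  induction cs with
  | nil => intro l u p o _; simp [pvALoop]
  | cons c cs ih =>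
    intro l u p o h
    have hc : pvRankCh c ≤ 3 := h c (by simp)
    have hrest : ∀ x ∈ cs, pvRankCh x ≤ 3 := fun x hx => h x (by simp [hx])
    by_cases hu : pvIsUpperCh c = true
    · have hr : pvRankCh c = 1 := pvRank_eq_one hu
      simp [pvALoop, hu, ih _ _ _ _ hrest, hr]
    · by_cases hl : pvIsLowerCh c = true
      · have hr : pvRankCh c = 0 := by unfold pvRankCh; simp [hl]
        simp [pvALoop, hu, hl, ih _ _ _ _ hrest, hr]
      · by_cases hd : pvIsDigitCh c = true
        · by_cases he : ((c.toNat - 48) % 2 == 0) = true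
          · have hr : pvRankCh c = 2 := by unfold pvRankCh; simp [hl, hu, hd, he]
            simp [pvALoop, hu, hl, hd, he, ih _ _ _ _ hrest, hr]
          · have hr : pvRankCh c = 3 := by unfold pvRankCh; simp [hl, hu, hd, he]
            simp [pvALoop, hu, hl, hd, he, ih _ _ _ _ hrest, hr]
        · exfalso
          unfold pvRankCh at hc
          simp [hl, hu, hd] at hc

-- ===== VERDICT (by name: the statement is the Claim_ definition above) =====
theorem AlphanumericStringSort_spec : Claim_equal_AlphanumericStringSort := by
  intro sentence _ hpre
  unfold Spec_AlphanumericStringSort AlphanumericStringSort AlphanumericStringSort_alt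
  have hpre' : ∀ c ∈ sentence.toList,
      (65 ≤ c.toNat ∧ c.toNat ≤ 90) ∨ (97 ≤ c.toNat ∧ c.toNat ≤ 122) ∨ (48 ≤ c.toNat ∧ c.toNat ≤ 57) := by
    intro c hc
    have h := List.all_eq_true.mp hpre c hc
    simp at h; tauto
  have hrk : ∀ c ∈ sentence.toList, pvRankCh c ≤ 3 := fun c hc => pvRank_le_three (hpre' c hc)
  rw [pvALoop_spec sentence.toList [] [] [] [] hrk, pvSorted_buckets sentence.toList hrk]
  simp
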